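-- pv_equiv track=rewrite | github.com/shu0411/training | python/trainingEnv/AtCoder/ABC416/C_test.py | increment_S_id
-- ===== SOURCE A (Python) =====
-- def increment_S_id(S_id, N, K):
--     if K == 1:
--         ret_S_id = [S_id[0] + 1]
--     else:
--         partial_S_id = increment_S_id(S_id[:-1], N, K-1)
--         ret_S_id = partial_S_id[:-1]
--         #位上げ処理
--         if partial_S_id[-1] == N:
--             ret_S_id.append(0)
--             ret_S_id.append(S_id[-1]+1)
--         else:
--             ret_S_id.append(partial_S_id[-1])
--             ret_S_id.append(S_id[-1])
--
--     return ret_S_id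
-- ===== SOURCE B (Python) =====
-- def increment_S_id(S_id, N, K):
--     # S_id[0] is the lowest digit; the upper K-1 digits occupy the tail of S_id.
--     out = [S_id[0] + 1]
--     base = len(S_id) - K
--     for i in range(1, K):
--         d = S_id[base + i]
--         if out[-1] == N:
--             out[-1] = 0
--             out.append(d + 1)
--         else:
--             out.append(d)
--     return out
-- ===== Notes on version B (the rewrite author's own statement) =====
-- stated objective: faster
-- what changed: A re-increments the digit prefix by recursion on K, slicing three lists at every level (O(K^2)); B increments the lowest digit once and walks up the remaining K-1 digits in a single carry-propagation loop (O(K)).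
import Mathlib
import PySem

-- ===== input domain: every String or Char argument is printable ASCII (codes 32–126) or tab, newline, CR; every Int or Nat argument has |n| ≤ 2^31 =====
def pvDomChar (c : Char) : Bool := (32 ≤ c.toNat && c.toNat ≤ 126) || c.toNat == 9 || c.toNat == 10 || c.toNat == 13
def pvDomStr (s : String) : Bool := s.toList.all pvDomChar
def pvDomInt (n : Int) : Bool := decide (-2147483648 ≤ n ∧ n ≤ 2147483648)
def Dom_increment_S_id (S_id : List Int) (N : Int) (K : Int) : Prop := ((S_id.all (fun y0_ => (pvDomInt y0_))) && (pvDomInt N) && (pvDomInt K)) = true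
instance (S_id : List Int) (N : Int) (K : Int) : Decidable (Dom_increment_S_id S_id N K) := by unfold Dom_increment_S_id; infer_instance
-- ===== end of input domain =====

-- B replaces A's prefix-recursion with per-level slicing (O(K^2)) by one bottom-up carry-propagation loop (O(K)).

-- ===== PORT A =====
def increment_S_id (S_id : List Int) (N : Int) (K : Int) : List Int :=
  if _hK : K ≤ 0 then []  -- totality guard: for K ≤ 0 the Python recursion never returns
  else if K = 1 then [(PySem.List.pyGet? S_id 0).getD 0 + 1]
  else
    let partial_S_id := increment_S_id (PySem.List.slice S_id none (some (-1))) N (K - 1)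
    let ret_S_id := PySem.List.slice partial_S_id none (some (-1))
    if (PySem.List.pyGet? partial_S_id (-1)).getD 0 = N then
      ret_S_id ++ [0] ++ [(PySem.List.pyGet? S_id (-1)).getD 0 + 1]
    else
      ret_S_id ++ [(PySem.List.pyGet? partial_S_id (-1)).getD 0] ++ [(PySem.List.pyGet? S_id (-1)).getD 0]
termination_by K.toNat
decreasing_by omega

-- ===== PORT B =====
-- Source B loop body; the mutation `out[-1] = 0; out.append(d+1)` is ported by hand as
-- `out.dropLast ++ [0, d+1]` (exact: out is nonempty throughout the loop).
def pvStepB (S_id : List Int) (N : Int) (base : Int) (out : List Int) (i : Int) : List Int :=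
  let d := (PySem.List.pyGet? S_id (base + i)).getD 0
  if (PySem.List.pyGet? out (-1)).getD 0 = N then out.dropLast ++ [0, d + 1]
  else out ++ [d]

def increment_S_id_alt (S_id : List Int) (N : Int) (K : Int) : List Int :=
  (PySem.List.pyRange 1 K 1).foldl (pvStepB S_id N ((S_id.length : Int) - K))
    [(PySem.List.pyGet? S_id 0).getD 0 + 1]

-- ===== PRECONDITION & SPEC =====
-- Pre_ excludes only the inputs on which A never returns: K ≤ 0 (the recursion K-1, K-2, …
-- never reaches the K == 1 base case) and K > len(S_id) (the base case hits S_id[0] of an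
-- emptied list: IndexError).
def Pre_increment_S_id (S_id : List Int) (N : Int) (K : Int) : Prop :=
  1 ≤ K ∧ K ≤ (S_id.length : Int)
instance (S_id : List Int) (N : Int) (K : Int) : Decidable (Pre_increment_S_id S_id N K) := by unfold Pre_increment_S_id; infer_instance

def pvWitness_increment_S_id : List Int × Int × Int := ([3, 9], 10, 2)

def Spec_increment_S_id (S_id : List Int) (N : Int) (K : Int) (out : List Int) : Prop := out = increment_S_id_alt S_id N K
instance (S_id : List Int) (N : Int) (K : Int) (out : List Int) : Decidable (Spec_increment_S_id S_id N K out) := by unfold Spec_increment_S_id; infer_instance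

-- ===== CLAIM =====
def Claim_equal_increment_S_id : Prop := ∀ (S_id : List Int) (N : Int) (K : Int), Dom_increment_S_id S_id N K → Pre_increment_S_id S_id N K → Spec_increment_S_id S_id N K (increment_S_id S_id N K)

-- ===== LEMMAS AND PROOFS =====

-- carry-state view of the loop: front of the output and the pending carry
def pvStep (N : Int) (st : List Int × Int) (d : Int) : List Int × Int :=
  if d + st.2 = N then (st.1 ++ [0], 1) else (st.1 ++ [d + st.2], 0)

def pvF (N : Int) (xs : List Int) : List Int × Int := xs.foldl (pvStep N) ([], 1)

-- the whole carry pass over a digit list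
def pvRun (N : Int) (T : List Int) : List Int :=
  (pvF N T.dropLast).1 ++ [T.getLast?.getD 0 + (pvF N T.dropLast).2]

-- the digits A operates on: first element plus the last j elements
def pvDig (S : List Int) (j : Nat) : List Int := S.take 1 ++ S.drop (S.length - j)

theorem pvF_concat (N : Int) (xs : List Int) (d : Int) :
    pvF N (xs ++ [d]) = pvStep N (pvF N xs) d := by
  simp [pvF, List.foldl_append]

theorem pv_dropLast_getLast (T : List Int) (h : T ≠ []) :
    T.dropLast ++ [T.getLast?.getD 0] = T := by
  induction T using List.reverseRecOn with
  | nil => exact absurd rfl h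
  | append_singleton xs x _ => simp

theorem pvRun_concat (N : Int) (T : List Int) (d : Int) (h : T ≠ []) :
    pvRun N (T ++ [d]) =
      if T.getLast?.getD 0 + (pvF N T.dropLast).2 = N then
        (pvF N T.dropLast).1 ++ [0] ++ [d + 1]
      else
        (pvF N T.dropLast).1 ++ [T.getLast?.getD 0 + (pvF N T.dropLast).2] ++ [d] := by
  unfold pvRun
  rw [List.dropLast_concat]
  conv_lhs => rw [← pv_dropLast_getLast T h]
  rw [pvF_concat]
  by_cases hc : T.getLast?.getD 0 + (pvF N T.dropLast).2 = N <;>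
    simp [pvStep, hc]

theorem pvDig_concat (ys : List Int) (d : Int) (k : Nat) (hk : k ≤ ys.length)
    (hne : ys ≠ []) :
    pvDig (ys ++ [d]) (k + 1) = pvDig ys k ++ [d] := by
  unfold pvDig
  have hy : 1 ≤ ys.length := List.length_pos_iff.mpr hne
  have hL : (ys ++ [d]).length - (k + 1) = ys.length - k := by simp
  rw [hL, List.take_append_of_le_length hy,
    List.drop_append_of_le_length (by omega)]
  simp

theorem pv_main (k : Nat) (S : List Int) (N : Int) (hlen : k + 1 ≤ S.length) :
    increment_S_id S N ((k : Int) + 1) = pvRun N (pvDig S k) := by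
  induction k generalizing S with
  | zero =>
      have hne : S ≠ [] := by intro h; rw [h] at hlen; simp at hlen
      obtain ⟨x, S', rfl⟩ := List.exists_cons_of_ne_nil hne
      rw [increment_S_id]
      simp [pvRun, pvDig, pvF, PySem.List.pyGet?, PySem.List.pyIdx?]
  | succ k ih =>
      have hSne : S ≠ [] := by intro h; subst h; simp at hlen
      obtain ⟨ys, d, rfl⟩ :=
        (List.eq_nil_or_concat S).resolve_left hSne
      simp only [List.concat_eq_append] at hlen ⊢
      have hys : k + 1 ≤ ys.length := by simp at hlen; omega
      have hysne : ys ≠ [] := by intro h; subst h; simp at hys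
      rw [increment_S_id]
      have hK0 : ¬ (((k + 1 : Nat) : Int) + 1 ≤ 0) := by push_cast; omega
      have hK1 : ¬ (((k + 1 : Nat) : Int) + 1 = 1) := by push_cast; omega
      rw [dif_neg hK0, if_neg hK1]
      have hsl : PySem.List.slice (ys ++ [d]) none (some (-1)) = ys := by
        rw [PySem.List.slice_to_neg_one]; simp
      rw [hsl, show (((k + 1 : Nat) : Int) + 1 - 1) = (k : Int) + 1 by push_cast; ring,
        ih ys hys]
      rw [pvDig_concat ys d k (by omega) hysne]
      rw [pvRun_concat N _ d (by
        unfold pvDig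
        obtain ⟨y, ys', rfl⟩ := List.exists_cons_of_ne_nil hysne
        simp)]
      unfold pvRun
      have hlast : PySem.List.pyGet?
          ((pvF N (pvDig ys k).dropLast).1 ++ [(pvDig ys k).getLast?.getD 0 + (pvF N (pvDig ys k).dropLast).2]) (-1)
          = some ((pvDig ys k).getLast?.getD 0 + (pvF N (pvDig ys k).dropLast).2) :=
        PySem.List.pyGet?_neg_one_append_singleton _ _
      have hlastS : PySem.List.pyGet? (ys ++ [d]) (-1) = some d :=
        PySem.List.pyGet?_neg_one_append_singleton _ _
      have hretsl : PySem.List.slice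
          ((pvF N (pvDig ys k).dropLast).1 ++ [(pvDig ys k).getLast?.getD 0 + (pvF N (pvDig ys k).dropLast).2]) none (some (-1))
          = (pvF N (pvDig ys k).dropLast).1 := by
        rw [PySem.List.slice_to_neg_one]; simp
      simp only [hlast, hlastS, hretsl, Option.getD_some]

-- the value-level body of B's loop (the digit already fetched)
def pvStepV (N : Int) (out : List Int) (d : Int) : List Int :=
  if (PySem.List.pyGet? out (-1)).getD 0 = N then out.dropLast ++ [0, d + 1]
  else out ++ [d]

-- B's index loop equals the value-level fold over the digits it reads
theorem pv_range_fold (S : List Int) (N base : Int) (m : Nat) (init : List Int)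
    (hb : 0 ≤ base) (hm : base.toNat + 1 + m ≤ S.length) :
    (PySem.List.pyRange 1 ((m : Int) + 1) 1).foldl (pvStepB S N base) init
      = ((S.drop (base.toNat + 1)).take m).foldl (pvStepV N) init := by
  induction m generalizing init with
  | zero => simp [PySem.List.pyRange_one_eq_nil]
  | succ m ih =>
      rw [show ((m + 1 : Nat) : Int) + 1 = ((m : Int) + 1) + 1 by push_cast; ring,
        PySem.List.pyRange_one_succ_right (by omega), List.foldl_append,
        ih init (by omega)]
      have hidx : base + ((m : Int) + 1) = ((base.toNat + 1 + m : Nat) : Int) := by omega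
      have hget : PySem.List.pyGet? S (base + ((m : Int) + 1))
          = some S[base.toNat + 1 + m] := by
        rw [hidx]; exact PySem.List.pyGet?_ofNat S _ (by omega)
      have htake : (S.drop (base.toNat + 1)).take (m + 1)
          = (S.drop (base.toNat + 1)).take m ++ [S[base.toNat + 1 + m]] := by
        rw [List.take_add_one]
        have hlt : m < (S.drop (base.toNat + 1)).length := by simp; omega
        rw [List.getElem?_eq_getElem hlt]
        simp
        rfl
      rw [htake, List.foldl_append]
      simp [pvStepB, pvStepV, hget]

-- the value-level loop, run over the trailing digits T with the incremented first digit x+1,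
-- equals the carry pass over x :: T
theorem pv_foldB (N x : Int) (T : List Int) :
    T.foldl (pvStepV N) [x + 1] = pvRun N (x :: T) := by
  induction T using List.reverseRecOn with
  | nil => simp [pvRun, pvF]
  | append_singleton T d ih =>
      rw [List.foldl_append, List.foldl_cons, List.foldl_nil, ih,
        show x :: (T ++ [d]) = (x :: T) ++ [d] by simp,
        pvRun_concat N (x :: T) d (by simp)]
      unfold pvRun pvStepV
      rw [PySem.List.pyGet?_neg_one_append_singleton, Option.getD_some,
        List.dropLast_concat]
      by_cases hc : (x :: T).getLast?.getD 0 + (pvF N (x :: T).dropLast).2 = N <;>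
        simp [hc]

theorem pv_alt_eq_run (S : List Int) (N K : Int) (h1 : 1 ≤ K) (h2 : K ≤ (S.length : Int)) :
    increment_S_id_alt S N K = pvRun N (pvDig S (K.toNat - 1)) := by
  obtain ⟨x, S', rfl⟩ := List.exists_cons_of_ne_nil
    (by intro h; subst h; simp at h2; omega : (S : List Int) ≠ [])
  have h2' : K ≤ (S'.length : Int) + 1 := by simpa using h2
  unfold increment_S_id_alt
  have hbase : (0:Int) ≤ ((x :: S').length : Int) - K := by simp; omega
  have hK : K = ((K.toNat - 1 : Nat) : Int) + 1 := by omega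
  have hbt : (((x :: S').length : Int) - K).toNat + 1 = (x :: S').length - (K.toNat - 1) := by
    simp; omega
  have hr := pv_range_fold (x :: S') N (((x :: S').length : Int) - K) (K.toNat - 1)
    [x + 1] hbase (by rw [hbt]; omega)
  rw [← hK] at hr
  rw [show PySem.List.pyGet? (x :: S') 0 = some x from PySem.List.pyGet?_ofNat _ 0 (by simp),
    Option.getD_some, hr]
  have htk : ((x :: S').drop ((((x :: S').length : Int) - K).toNat + 1)).take (K.toNat - 1)
      = (x :: S').drop ((x :: S').length - (K.toNat - 1)) := by
    rw [hbt, List.take_of_length_le (by simp; omega)]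
  rw [htk, pv_foldB]
  unfold pvDig
  have hdrop : (x :: S').drop ((x :: S').length - (K.toNat - 1))
      = S'.drop (S'.length - (K.toNat - 1)) := by
    rw [show (x :: S').length - (K.toNat - 1) = (S'.length - (K.toNat - 1)) + 1 by simp; omega]
    simp
  rw [show (x :: S').take 1 ++ (x :: S').drop ((x :: S').length - (K.toNat - 1))
      = x :: (x :: S').drop ((x :: S').length - (K.toNat - 1)) by simp, hdrop]

-- ===== VERDICT =====
theorem increment_S_id_spec : Claim_equal_increment_S_id := by
  intro S_id N K _ hPre
  obtain ⟨hK1, hlen⟩ := hPre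
  unfold Spec_increment_S_id
  rw [pv_alt_eq_run S_id N K hK1 hlen]
  have hk : K = ((K.toNat - 1 : Nat) : Int) + 1 := by omega
  rw [hk]
  exact pv_main (K.toNat - 1) S_id N (by omega)
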